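-- pv_equiv track=rewrite | github.com/leeyomyeon/PythonProject | [카카오 인턴] 키패드 누르기.py | solution
-- ===== SOURCE A (Python) =====
-- def solution(numbers, hand):
--     answer = ''
--     left_finger = 10
--     right_finger = 11
--     arr = [[1, 2, 3], [4, 5, 6], [7, 8, 9], [10, 0, 11]]
--
--     left_finger_index = []
--     right_finger_index = []
--     current_number_index = []
--     for i in numbers:
--         if i == 1 or i == 4 or i == 7:
--             left_finger = i
--             answer += 'L'
--         elif i == 3 or i == 6 or i == 9:
--             right_finger = i
--             answer += 'R'
--         else:
--             for j in range (4):
--                 for k in range (3):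
--                     if left_finger == arr[j][k]:
--                         left_finger_index = [j, k]
--                     if right_finger == arr[j][k]:
--                         right_finger_index = [j, k]
--                     if i == arr[j][k]:
--                         current_number_index = [j, k]
--
--             left_distance = abs(current_number_index[0] - left_finger_index[0]) + abs(current_number_index[1] - left_finger_index[1])
--             right_distance = abs(current_number_index[0] - right_finger_index[0]) + abs(current_number_index[1] - right_finger_index[1])
--
--             if left_distance < right_distance:
--                 left_finger = i
--                 answer += 'L'
--             elif left_distance > right_distance:
--                 right_finger = i
--                 answer += 'R'
--             elif left_distance == right_distance:
--                 answer += hand[0].upper()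
--                 if hand[0] == 'l':
--                     left_finger = i
--                 elif hand[0] == 'r':
--                     right_finger = i
--
--     return answer
-- ===== SOURCE B (Python) =====
-- def solution(numbers, hand):
--     # Closed-form arithmetic: every else-branch target key (0,2,5,8) sits in the
--     # middle column, so dist(finger, target) = |row difference| + (1 if the finger
--     # is on a side column else 0); no keypad grid or coordinates are kept.
--     def row(k):
--         return 3 if k == 0 else (k - 1) // 3
--
--     def dist(f, n):
--         return abs(row(f) - row(n)) + (f not in (0, 2, 5, 8))
--
--     def go(rest, left, right):
--         if not rest:
--             return ''
--         n = rest[0]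
--         if n in (1, 4, 7):
--             return 'L' + go(rest[1:], n, right)
--         if n in (3, 6, 9):
--             return 'R' + go(rest[1:], left, n)
--         dl = dist(left, n)
--         dr = dist(right, n)
--         if dl < dr:
--             return 'L' + go(rest[1:], n, right)
--         if dl > dr:
--             return 'R' + go(rest[1:], left, n)
--         h = hand[0]
--         return h.upper() + go(rest[1:], n if h == 'l' else left,
--                               n if h == 'r' else right)
--
--     return go(numbers, 10, 11)
-- ===== Notes on version B (the rewrite author's own statement) =====
-- stated objective: simpler
-- what changed: B drops A's keypad grid entirely: since every else-branch target (0,2,5,8) is in the middle column, the distance is the closed-form |row(f)-row(n)| plus 1 for a side-column finger, and the answer string is built by direct recursion on the digit list instead of A's stateful accumulator loop over a 4x3 grid scan.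
-- outside the precondition, e.g. on solution([10], 'right'): A returns 'L', B returns 'R'; on solution([5, 99], 'right'): A returns 'RR', B returns 'RL'; on solution([1, 5], ''): A returns 'LL', B returns 'LL'
import Mathlib
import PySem

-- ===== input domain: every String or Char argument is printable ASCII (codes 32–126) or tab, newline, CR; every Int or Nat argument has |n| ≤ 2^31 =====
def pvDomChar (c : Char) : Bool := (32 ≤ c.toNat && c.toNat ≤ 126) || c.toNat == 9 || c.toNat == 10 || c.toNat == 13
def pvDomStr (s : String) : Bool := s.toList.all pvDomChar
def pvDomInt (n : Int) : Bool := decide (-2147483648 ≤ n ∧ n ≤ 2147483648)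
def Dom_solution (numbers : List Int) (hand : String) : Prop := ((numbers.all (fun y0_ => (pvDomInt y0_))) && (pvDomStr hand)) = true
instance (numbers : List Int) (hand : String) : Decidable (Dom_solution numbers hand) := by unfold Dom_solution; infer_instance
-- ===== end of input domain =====

-- B keeps no keypad grid: every else-branch target key is in the middle column, so the
-- distance is the closed-form |row(f) - row(n)| + side-column offset, and the answer is
-- built by direct recursion on the digit list (objective: simpler).

-- ===== PORT A =====
def pvArrA : List (List Int) := [[1, 2, 3], [4, 5, 6], [7, 8, 9], [10, 0, 11]]

-- the inner 'for j in range(4): for k in range(3):' scan of A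
def pvScanA (lf rf i : Int) (s : List Int × List Int × List Int) : List Int × List Int × List Int :=
  (PySem.List.pyRange 0 4 1).foldl (fun s j =>
    (PySem.List.pyRange 0 3 1).foldl (fun s k =>
      let cell := (PySem.List.pyGet? ((PySem.List.pyGet? pvArrA j).getD []) k).getD (-1)
      let lfi := if lf == cell then [j, k] else s.1
      let rfi := if rf == cell then [j, k] else s.2.1
      let ci  := if i == cell then [j, k] else s.2.2
      (lfi, rfi, ci)) s) s

def pvStepA (hand : String) (st : String × Int × Int × List Int × List Int × List Int) (i : Int) :
    String × Int × Int × List Int × List Int × List Int :=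
  let (answer, lf, rf, lfi, rfi, ci) := st
  if i == 1 || i == 4 || i == 7 then (answer ++ "L", i, rf, lfi, rfi, ci)
  else if i == 3 || i == 6 || i == 9 then (answer ++ "R", lf, i, lfi, rfi, ci)
  else
    let sc := pvScanA lf rf i (lfi, rfi, ci)
    let lfi := sc.1
    let rfi := sc.2.1
    let ci := sc.2.2
    let ld : Int := |(PySem.List.pyGet? ci 0).getD 0 - (PySem.List.pyGet? lfi 0).getD 0| +
                    |(PySem.List.pyGet? ci 1).getD 0 - (PySem.List.pyGet? lfi 1).getD 0|
    let rd : Int := |(PySem.List.pyGet? ci 0).getD 0 - (PySem.List.pyGet? rfi 0).getD 0| +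
                    |(PySem.List.pyGet? ci 1).getD 0 - (PySem.List.pyGet? rfi 1).getD 0|
    if ld < rd then (answer ++ "L", i, rf, lfi, rfi, ci)
    else if ld > rd then (answer ++ "R", lf, i, lfi, rfi, ci)
    else
      let h := (PySem.Str.pyGet? hand 0).getD ' '   -- hand[0]; Pre_ excludes the raising case
      let answer := answer ++ String.ofList [PySem.Chars.upperChar h]
      if h == 'l' then (answer, i, rf, lfi, rfi, ci)
      else if h == 'r' then (answer, lf, i, lfi, rfi, ci)
      else (answer, lf, rf, lfi, rfi, ci)

def solution (numbers : List Int) (hand : String) : String :=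
  (numbers.foldl (pvStepA hand) ("", 10, 11, [], [], [])).1

-- ===== PORT B =====
def pvRowB (k : Int) : Int := if k == 0 then 3 else PySem.Int.floordiv (k - 1) 3

def pvDistB (f n : Int) : Int :=
  |pvRowB f - pvRowB n| + (if f == 0 || f == 2 || f == 5 || f == 8 then 0 else 1)

def pvGoB (hand : String) : List Int → Int → Int → String
  | [], _, _ => ""
  | n :: rest, left, right =>
    if n == 1 || n == 4 || n == 7 then "L" ++ pvGoB hand rest n right
    else if n == 3 || n == 6 || n == 9 then "R" ++ pvGoB hand rest left n
    else
      let dl := pvDistB left n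
      let dr := pvDistB right n
      if dl < dr then "L" ++ pvGoB hand rest n right
      else if dl > dr then "R" ++ pvGoB hand rest left n
      else
        let h := (PySem.Str.pyGet? hand 0).getD ' '   -- hand[0]; Pre_ excludes the raising case
        String.ofList [PySem.Chars.upperChar h] ++
          pvGoB hand rest (if h == 'l' then n else left) (if h == 'r' then n else right)

def solution_alt (numbers : List Int) (hand : String) : String :=
  pvGoB hand numbers 10 11

-- ===== PRECONDITION & SPEC =====
-- Pre_ restricts digits to the keypad's natural domain 0..9: outside it A raises IndexError
-- on a leading invalid digit or silently reuses the stale index of a previous keypress (and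
-- treats the internal sentinels 10/11 as pressable corner keys), while B's middle-column
-- distance formula does not apply; it also excludes an empty hand unless every digit is an
-- edge-column key, since with other digits A (and B) raise IndexError at hand[0] whenever a
-- distance tie occurs, which is not decidable without running the simulation.
def Pre_solution (numbers : List Int) (hand : String) : Prop :=
  (∀ n ∈ numbers, 0 ≤ n ∧ n ≤ 9) ∧
    (hand ≠ "" ∨ ∀ n ∈ numbers, (n == 1 || n == 4 || n == 7 || n == 3 || n == 6 || n == 9) = true)
instance (numbers : List Int) (hand : String) : Decidable (Pre_solution numbers hand) := by
  unfold Pre_solution; infer_instance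

def pvWitness_solution : List Int × String := ([1, 3, 4, 5, 8, 2, 0], "right")

def Spec_solution (numbers : List Int) (hand : String) (out : String) : Prop := out = solution_alt numbers hand
instance (numbers : List Int) (hand : String) (out : String) : Decidable (Spec_solution numbers hand out) := by unfold Spec_solution; infer_instance

-- ===== CLAIM (what is proved, stated in full; the proofs are below) =====
def Claim_equal_solution : Prop := ∀ (numbers : List Int) (hand : String), Dom_solution numbers hand → Pre_solution numbers hand → Spec_solution numbers hand (solution numbers hand)

-- ===== LEMMAS AND PROOFS =====

-- reference coordinate of key v on the pad (proof-only helper)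
def pvRC (v : Int) : Int × Int :=
  if v == 0 then (3, 1) else if v == 10 then (3, 0) else if v == 11 then (3, 2)
  else (PySem.Int.floordiv (v - 1) 3, PySem.Int.mod (v - 1) 3)

set_option maxHeartbeats 1000000 in
lemma pvScan_eq (lf rf i : Int) (s : List Int × List Int × List Int)
    (hl0 : 0 ≤ lf) (hl1 : lf ≤ 11) (hr0 : 0 ≤ rf) (hr1 : rf ≤ 11) (hi0 : 0 ≤ i) (hi1 : i ≤ 11) :
    pvScanA lf rf i s =
      ([(pvRC lf).1, (pvRC lf).2], [(pvRC rf).1, (pvRC rf).2], [(pvRC i).1, (pvRC i).2]) := by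
  obtain ⟨l0, r0, c0⟩ := s
  have hr4 : PySem.List.pyRange 0 4 1 = [0, 1, 2, 3] := by decide
  have hr3 : PySem.List.pyRange 0 3 1 = [0, 1, 2] := by decide
  have hc00 : (PySem.List.pyGet? ((PySem.List.pyGet? pvArrA 0).getD []) 0).getD (-1) = 1 := by decide
  have hc01 : (PySem.List.pyGet? ((PySem.List.pyGet? pvArrA 0).getD []) 1).getD (-1) = 2 := by decide
  have hc02 : (PySem.List.pyGet? ((PySem.List.pyGet? pvArrA 0).getD []) 2).getD (-1) = 3 := by decide
  have hc10 : (PySem.List.pyGet? ((PySem.List.pyGet? pvArrA 1).getD []) 0).getD (-1) = 4 := by decide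
  have hc11 : (PySem.List.pyGet? ((PySem.List.pyGet? pvArrA 1).getD []) 1).getD (-1) = 5 := by decide
  have hc12 : (PySem.List.pyGet? ((PySem.List.pyGet? pvArrA 1).getD []) 2).getD (-1) = 6 := by decide
  have hc20 : (PySem.List.pyGet? ((PySem.List.pyGet? pvArrA 2).getD []) 0).getD (-1) = 7 := by decide
  have hc21 : (PySem.List.pyGet? ((PySem.List.pyGet? pvArrA 2).getD []) 1).getD (-1) = 8 := by decide
  have hc22 : (PySem.List.pyGet? ((PySem.List.pyGet? pvArrA 2).getD []) 2).getD (-1) = 9 := by decide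
  have hc30 : (PySem.List.pyGet? ((PySem.List.pyGet? pvArrA 3).getD []) 0).getD (-1) = 10 := by decide
  have hc31 : (PySem.List.pyGet? ((PySem.List.pyGet? pvArrA 3).getD []) 1).getD (-1) = 0 := by decide
  have hc32 : (PySem.List.pyGet? ((PySem.List.pyGet? pvArrA 3).getD []) 2).getD (-1) = 11 := by decide
  simp only [pvScanA, hr4, hr3, List.foldl_cons, List.foldl_nil, hc00, hc01, hc02, hc10, hc11, hc12, hc20, hc21, hc22, hc30, hc31, hc32]
  simp only [Prod.mk.injEq]
  refine ⟨?_, ?_, ?_⟩ <;>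
    [interval_cases lf; interval_cases rf; interval_cases i] <;>
    norm_num [pvRC, PySem.Int.floordiv, PySem.Int.mod] <;> decide

lemma pvGet2_0 (a b : Int) : (PySem.List.pyGet? [a, b] 0).getD 0 = a := by
  simp [PySem.List.pyGet?, show PySem.List.pyIdx? 2 (0 : Int) = some 0 from by decide]

lemma pvGet2_1 (a b : Int) : (PySem.List.pyGet? [a, b] 1).getD 0 = b := by
  simp [PySem.List.pyGet?, show PySem.List.pyIdx? 2 (1 : Int) = some 1 from by decide]

-- on middle-column targets B's closed-form distance equals the grid Manhattan distance
lemma pvDist_eq (f n : Int) (hf0 : 0 ≤ f) (hf1 : f ≤ 11)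
    (hn : n = 0 ∨ n = 2 ∨ n = 5 ∨ n = 8) :
    |(pvRC n).1 - (pvRC f).1| + |(pvRC n).2 - (pvRC f).2| = pvDistB f n := by
  interval_cases f <;> rcases hn with rfl | rfl | rfl | rfl <;> decide

lemma pvMain (hand : String) (numbers : List Int) (hnum : ∀ n ∈ numbers, 0 ≤ n ∧ n ≤ 9)
    (ans : String) (lf rf : Int) (lfi rfi ci : List Int)
    (hl0 : 0 ≤ lf) (hl1 : lf ≤ 11) (hr0 : 0 ≤ rf) (hr1 : rf ≤ 11) :
    (numbers.foldl (pvStepA hand) (ans, lf, rf, lfi, rfi, ci)).1 =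
      ans ++ pvGoB hand numbers lf rf := by
  induction numbers generalizing ans lf rf lfi rfi ci with
  | nil => simp [pvGoB]
  | cons n ns ih =>
    obtain ⟨⟨hn0, hn1⟩, hns⟩ : (0 ≤ n ∧ n ≤ 9) ∧ ∀ m ∈ ns, 0 ≤ m ∧ m ≤ 9 := by
      refine ⟨hnum n (by simp), fun m hm => hnum m (by simp [hm])⟩
    simp only [List.foldl_cons]
    by_cases h1 : (n == 1 || n == 4 || n == 7) = true
    · rw [show pvStepA hand (ans, lf, rf, lfi, rfi, ci) n = (ans ++ "L", n, rf, lfi, rfi, ci) by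
        simp [pvStepA, h1]]
      rw [ih hns _ _ _ _ _ _ hn0 (by omega) hr0 hr1]
      simp [pvGoB, h1, String.append_assoc]
    · by_cases h2 : (n == 3 || n == 6 || n == 9) = true
      · rw [show pvStepA hand (ans, lf, rf, lfi, rfi, ci) n = (ans ++ "R", lf, n, lfi, rfi, ci) by
          simp [pvStepA, h1, h2]]
        rw [ih hns _ _ _ _ _ _ hl0 hl1 hn0 (by omega)]
        simp [pvGoB, h1, h2, String.append_assoc]
      · have hn4 : n = 0 ∨ n = 2 ∨ n = 5 ∨ n = 8 := by
          simp only [Bool.or_eq_true, beq_iff_eq, not_or] at h1 h2; omega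
        have hscan := pvScan_eq lf rf n (lfi, rfi, ci) hl0 hl1 hr0 hr1 hn0 (by omega)
        have hdl := pvDist_eq lf n hl0 hl1 hn4
        have hdr := pvDist_eq rf n hr0 hr1 hn4
        have h1' : (n == 1 || n == 4 || n == 7) = false := by simpa using h1
        have h2' : (n == 3 || n == 6 || n == 9) = false := by simpa using h2
        have hA : pvStepA hand (ans, lf, rf, lfi, rfi, ci) n =
            (if pvDistB lf n < pvDistB rf n then
               (ans ++ "L", n, rf, [(pvRC lf).1, (pvRC lf).2], [(pvRC rf).1, (pvRC rf).2], [(pvRC n).1, (pvRC n).2])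
             else if pvDistB lf n > pvDistB rf n then
               (ans ++ "R", lf, n, [(pvRC lf).1, (pvRC lf).2], [(pvRC rf).1, (pvRC rf).2], [(pvRC n).1, (pvRC n).2])
             else
               let h := (PySem.Str.pyGet? hand 0).getD ' '
               let answer := ans ++ String.ofList [PySem.Chars.upperChar h]
               if h == 'l' then (answer, n, rf, [(pvRC lf).1, (pvRC lf).2], [(pvRC rf).1, (pvRC rf).2], [(pvRC n).1, (pvRC n).2])
               else if h == 'r' then (answer, lf, n, [(pvRC lf).1, (pvRC lf).2], [(pvRC rf).1, (pvRC rf).2], [(pvRC n).1, (pvRC n).2])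
               else (answer, lf, rf, [(pvRC lf).1, (pvRC lf).2], [(pvRC rf).1, (pvRC rf).2], [(pvRC n).1, (pvRC n).2])) := by
          simp only [pvStepA, h1', h2', Bool.false_eq_true, if_false, hscan,
            pvGet2_0, pvGet2_1, hdl, hdr]
        have hB : pvGoB hand (n :: ns) lf rf =
            (if pvDistB lf n < pvDistB rf n then "L" ++ pvGoB hand ns n rf
             else if pvDistB lf n > pvDistB rf n then "R" ++ pvGoB hand ns lf n
             else
               let h := (PySem.Str.pyGet? hand 0).getD ' '
               String.ofList [PySem.Chars.upperChar h] ++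
                 pvGoB hand ns (if h == 'l' then n else lf) (if h == 'r' then n else rf)) := by
          simp only [pvGoB, h1', h2', Bool.false_eq_true, if_false, gt_iff_lt]
        rw [hA, hB]
        by_cases hlt : pvDistB lf n < pvDistB rf n
        · simp only [if_pos hlt]
          rw [ih hns _ _ _ _ _ _ hn0 (by omega) hr0 hr1, String.append_assoc]
        · by_cases hgt : pvDistB lf n > pvDistB rf n
          · simp only [if_neg hlt, if_pos hgt]
            rw [ih hns _ _ _ _ _ _ hl0 hl1 hn0 (by omega), String.append_assoc]
          · simp only [if_neg hlt, if_neg hgt]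
            set h := (PySem.Str.pyGet? hand 0).getD ' ' with hh
            by_cases hc : (h == 'l') = true
            · simp only [if_pos hc]
              have : (h == 'r') = false := by
                rw [beq_iff_eq.mp hc]; decide
              simp only [this, Bool.false_eq_true, if_false]
              rw [ih hns _ _ _ _ _ _ hn0 (by omega) hr0 hr1, String.append_assoc]
            · by_cases hc2 : (h == 'r') = true
              · simp only [if_neg hc, if_pos hc2]
                rw [ih hns _ _ _ _ _ _ hl0 hl1 hn0 (by omega), String.append_assoc]
              · simp only [if_neg hc, if_neg hc2]
                rw [ih hns _ _ _ _ _ _ hl0 hl1 hr0 hr1, String.append_assoc]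

-- ===== VERDICT (by name: the statement is the Claim_ definition above) =====
theorem solution_spec : Claim_equal_solution := by
  intro numbers hand _ hpre
  unfold Spec_solution solution solution_alt
  simpa using pvMain hand numbers hpre.1 "" 10 11 [] [] []
    (by decide) (by decide) (by decide) (by decide)
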